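/- GENERATED by tools/from_farm_form.py from prooffarm-gif/accepted/DGifDecreaseImageCounter.3/Proof.lean (a worked proof of the farm's unit `DGifDecreaseImageCounter.3`,
   accepted by the verdict) — do not edit. -/
import Gif.Spec.Units.DGifDecreaseImageCounter_3
import Gif.Spec.AllSegs
import Gif.Spec.Proved.DGifDecreaseImageCounter_3_Lemmas

open X86 X86.User Asan ProgX.Base ProgX.Base.Spec Gif.Spec

/-!
  `DGifDecreaseImageCounter.3` (0x10a4f2 … 0x10a531 and 0x10a538 … 0x10a56f, 30 instructions; dgif_lib.c:1166-1178): from CUT 2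
  (`AfterMap`) to CUT 3 (`Done`). The branch `ImageCount <= 0` is decided by the ghost list `init` of the images that stay, so the
  segment is one of two walks (Lemmas.lean): `dc3_empty` (`init = []`: the array is freed, NULL and 0 are stored) and `dc3_shrink`
  (`init ≠ []`: `reallocarray` shrinks the array, always in place for this heap, and the same address is stored).
-/

/-- Segment 3 of `DGifDecreaseImageCounter` takes `AfterMap` at 0x10a4f2 to `Done` at 0x10a531. -/
theorem Gif.Spec.Proved.DGifDecreaseImageCounter_3_ok : Gif.Spec.DGifDecreaseImageCounter_3.Statement := by
  unfold Gif.Spec.DGifDecreaseImageCounter_3.Statement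
  intro Lay hLay μ hμ u₀ hcode h_reallocarray h_free h_load4 h_load8 h_store8 h_store4
  intro H rest frames F R init g s Hc e ret v hat
  cases init with
  | nil =>
    -- `ImageCount = 0` (dgif_lib.c:1166-1170): `free(gif.SavedImages)` at the heap `Hc`, for the array of `56 · cap` bytes
    exact Gif.Spec.DGifDecreaseImageCounter_3.dc3_empty Lay hLay μ hμ u₀ hcode h_load4 h_load8 h_store8 h_store4
      H rest frames F R g s Hc e ret (h_free Hc rest frames (56 * s.cap)) v hat
  | cons a l =>
    -- `ImageCount > 0` (dgif_lib.c:1174-1178): `reallocarray(gif.SavedImages, ImageCount, 56)` at the heap `Hc`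
    have hlen : 1 ≤ (a :: l).length := by
      rw [List.length_cons]
      omega
    exact Gif.Spec.DGifDecreaseImageCounter_3.dc3_shrink Lay hLay μ hμ u₀ hcode h_load4 h_load8 h_store8
      H rest frames F R (a :: l) g s Hc e ret hlen (fun n c => h_reallocarray Hc rest frames n c) v hat
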